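-- pv_equiv track=rewrite | github.com/nokia/ice-support-pkg | HealthChecks/flows/OpenStack/swift_service_validator.py | get_count_for_flavor
-- ===== SOURCE A (Python) =====
-- def get_count_for_flavor(possible_flavor, output_list):
--     flavor_counter_dict_1 = dict.fromkeys(possible_flavor,0)
--     flavor_counter_dict = {('-' + k + '-'): v for (k, v) in list(flavor_counter_dict_1.items())}
-- #    print ("flavor count dict {}".format(flavor_counter_dict))
--     for key in flavor_counter_dict:
--         for flavorname in output_list:
--             if key in flavorname:
--                 flavor_counter_dict[key] += 1
--     return flavor_counter_dict
-- ===== SOURCE B (Python) =====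
-- def get_count_for_flavor(possible_flavor, output_list):
--     # Dash-anchored candidate extraction: every wrapped key '-f-' occurring in a line is
--     # determined by a pair of '-' positions, so extract the tokens between dash pairs and
--     # tally them by hash lookup instead of searching every key in every line.
--     counts = dict.fromkeys(possible_flavor, 0)
--     for line in output_list:
--         dashes = [i for i, c in enumerate(line) if c == '-']
--         toks = {line[a + 1:b] for a in dashes for b in dashes if a < b}
--         for tok in toks:
--             if tok in counts:
--                 counts[tok] += 1
--     return {('-' + f + '-'): c for f, c in counts.items()}
-- ===== Notes on version B (the rewrite author's own statement) =====
-- stated objective: faster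
-- what changed: B replaces A's per-key substring search over every line by dash-anchored candidate extraction: for each line it collects the '-' positions once, forms the set of tokens lying between dash pairs, and tallies those candidates by dictionary lookup, so the per-line loop over all flavors disappears.
import Mathlib
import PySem

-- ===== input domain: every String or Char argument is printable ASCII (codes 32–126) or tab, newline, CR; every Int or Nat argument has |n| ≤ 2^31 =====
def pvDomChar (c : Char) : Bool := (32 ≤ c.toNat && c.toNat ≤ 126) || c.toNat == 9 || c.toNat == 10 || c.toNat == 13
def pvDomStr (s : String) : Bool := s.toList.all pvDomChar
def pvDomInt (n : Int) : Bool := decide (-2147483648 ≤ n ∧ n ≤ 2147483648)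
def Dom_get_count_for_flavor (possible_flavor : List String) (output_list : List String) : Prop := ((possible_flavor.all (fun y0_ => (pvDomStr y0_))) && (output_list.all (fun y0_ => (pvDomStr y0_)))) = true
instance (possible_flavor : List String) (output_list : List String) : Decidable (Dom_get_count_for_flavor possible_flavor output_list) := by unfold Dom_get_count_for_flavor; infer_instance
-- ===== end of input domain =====

-- B replaces A's per-key substring scan of every line by dash-anchored candidate extraction:
-- every occurrence of a wrapped key '-f-' in a line is bounded by two '-' characters, so B
-- collects the dash positions of each line once, forms the set of tokens lying between two
-- dashes, and tallies those candidates by dictionary lookup (alternative algorithm; the flavor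
-- loop over each line disappears).

-- ===== PORT A =====
-- literal transliteration of A. 'flavor_counter_dict[key] += 1' is ported as
-- 'modify key 0 (· + 1)'; the key is always present, so the default 0 is never used.
-- The Python iterates the dict's keys while mutating only VALUES of existing keys, so fixing
-- the key list before the loop is exactly Python's iteration behaviour here.
def get_count_for_flavor (possible_flavor : List String) (output_list : List String) : List (String × Int) :=
  let flavor_counter_dict_1 : PySem.Dict String Int :=
    possible_flavor.foldl (fun d k => d.insert k 0) PySem.Dict.empty
  let flavor_counter_dict : PySem.Dict String Int :=
    flavor_counter_dict_1.items.foldl (fun d kv => d.insert ("-" ++ kv.1 ++ "-") kv.2) PySem.Dict.empty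
  let final : PySem.Dict String Int :=
    flavor_counter_dict.keys.foldl (fun d key =>
      output_list.foldl (fun d flavorname =>
        if PySem.Str.isIn key flavorname then d.modify key 0 (· + 1) else d) d)
      flavor_counter_dict
  final.items

-- ===== PORT B =====
-- B-side helpers: the two comprehensions of Source B.
-- 'dashes = [i for i, c in enumerate(line) if c == '-']'
def pvDashes (l : List Char) : List Int :=
  (PySem.List.enumerate l 0).filterMap (fun p => if p.2 = '-' then some p.1 else none)

-- 'toks = {line[a + 1:b] for a in dashes for b in dashes if a < b}'
def pvToks (line : String) : PySem.Set String :=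
  PySem.Set.ofList ((pvDashes line.toList).flatMap (fun a =>
    ((pvDashes line.toList).filter (fun b => a < b)).map
      (fun b => PySem.Str.slice line (some (a + 1)) (some b))))

-- transliteration of Source B: counts = fromkeys(possible_flavor, 0); for each line build the
-- between-dash token set and bump the counter of every token that is a flavor
-- ('counts[tok] += 1' = 'modify tok 0 (· + 1)'); finally wrap the keys.
def get_count_for_flavor_alt (possible_flavor : List String) (output_list : List String) : List (String × Int) :=
  let counts0 : PySem.Dict String Int :=
    possible_flavor.foldl (fun d f => d.insert f 0) PySem.Dict.empty
  let final : PySem.Dict String Int :=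
    output_list.foldl (fun counts line =>
      (pvToks line).foldl (fun d tok =>
        if d.contains tok then d.modify tok 0 (· + 1) else d) counts)
      counts0
  final.items.map (fun kv => ("-" ++ kv.1 ++ "-", kv.2))

-- ===== PRECONDITION & SPEC =====
def Spec_get_count_for_flavor (possible_flavor : List String) (output_list : List String) (out : List (String × Int)) : Prop := out = get_count_for_flavor_alt possible_flavor output_list
instance (possible_flavor : List String) (output_list : List String) (out : List (String × Int)) : Decidable (Spec_get_count_for_flavor possible_flavor output_list out) := by unfold Spec_get_count_for_flavor; infer_instance

-- ===== CLAIM (what is proved, stated in full; the proofs are below) =====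
def Claim_equal_get_count_for_flavor : Prop := ∀ (possible_flavor : List String) (output_list : List String), Dom_get_count_for_flavor possible_flavor output_list → Spec_get_count_for_flavor possible_flavor output_list (get_count_for_flavor possible_flavor output_list)

-- ===== LEMMAS AND PROOFS =====

-- the common characterization: each wrapped key paired with the number of output lines containing it
def pvChar (possible_flavor : List String) (output_list : List String) : List (String × Int) :=
  ((PySem.List.dedup possible_flavor).map (fun f => "-" ++ f ++ "-")).map
    (fun k => (k, (output_list.countP (fun line => PySem.Str.isIn k line) : Int)))

theorem pv_wrap_inj : Function.Injective (fun f : String => "-" ++ f ++ "-") := by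
  intro a b h
  have h2 : "-".toList ++ (a.toList ++ "-".toList) = "-".toList ++ (b.toList ++ "-".toList) := by
    simpa [String.toList_append, List.append_assoc] using congrArg String.toList h
  have h3 := List.append_cancel_left h2
  exact String.toList_inj.mp (List.append_cancel_right h3)

-- fromkeys loop: inserting 0 at every key of a zero-valued dict
theorem pv_foldl_insert_zero (l : List String) (d : PySem.Dict String Int)
    (h : d.items = d.keys.map (fun k => (k, (0 : Int)))) :
    (l.foldl (fun d k => d.insert k (0 : Int)) d).items
      = (PySem.Set.update d.keys l).map (fun k => (k, (0 : Int))) := by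
  induction l generalizing d with
  | nil => simpa [PySem.Set.update] using h
  | cons k l ih =>
    show (l.foldl (fun d k => d.insert k (0 : Int)) (d.insert k 0)).items = _
    by_cases hc : d.contains k = true
    · have hmem : k ∈ d.keys := by
        rw [PySem.Dict.contains_eq_decide_mem_keys] at hc
        exact of_decide_eq_true hc
      have hkeys : (d.insert k (0 : Int)).keys = d.keys :=
        PySem.Dict.keys_insert_of_contains d 0 hc
      have hitems : (d.insert k (0 : Int)).items = d.items := by
        rw [PySem.Dict.items_insert_of_contains d 0 hc, h, List.map_map]
        apply List.map_congr_left
        intro a _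
        by_cases hak : a = k
        · simp [Function.comp, hak]
        · simp [Function.comp, hak]
      have hupd : PySem.Set.update d.keys (k :: l) = PySem.Set.update (d.insert k (0:Int)).keys l := by
        simp [PySem.Set.update, PySem.Set.add, hmem, hkeys]
      rw [hupd]
      exact ih _ (by rw [hitems, hkeys, h])
    · have hc' : d.contains k = false := by simpa using hc
      have hmem : k ∉ d.keys := by
        rw [PySem.Dict.contains_eq_decide_mem_keys] at hc'
        simpa using of_decide_eq_false hc'
      have hkeys : (d.insert k (0 : Int)).keys = d.keys ++ [k] :=
        PySem.Dict.keys_insert_of_not_contains d 0 hc'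
      have hitems : (d.insert k (0 : Int)).items = d.items ++ [(k, 0)] :=
        PySem.Dict.items_insert_of_not_contains d 0 hc'
      have hupd : PySem.Set.update d.keys (k :: l) = PySem.Set.update (d.insert k (0:Int)).keys l := by
        simp [PySem.Set.update, PySem.Set.add, hmem, hkeys]
      rw [hupd]
      exact ih _ (by rw [hitems, hkeys, h, List.map_append]; simp)

-- the inner 'for flavorname in output_list' loop touches only 'key'
theorem pv_inner_loop (key : String) (ol : List String) (d : PySem.Dict String Int)
    (hk : d.contains key = true) :
    ((ol.foldl (fun d line => if PySem.Str.isIn key line then d.modify key 0 (· + 1) else d) d).keys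
        = d.keys)
    ∧ (∀ j, (ol.foldl (fun d line => if PySem.Str.isIn key line then d.modify key 0 (· + 1) else d) d).getD j 0
        = if j = key then d.getD key 0 + (ol.countP (fun line => PySem.Str.isIn key line) : Int)
          else d.getD j 0) := by
  induction ol generalizing d with
  | nil => simp
  | cons line ol ih =>
    simp only [List.foldl_cons]
    by_cases hl : PySem.Str.isIn key line = true
    · rw [if_pos hl]
      have hl2 : PySem.Chars.isIn key.toList line.toList = true := by simpa using hl
      have hc' : (d.modify key 0 (· + 1)).contains key = true := by
        simp [PySem.Dict.contains_modify, hk]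
      have hkeys : (d.modify key 0 (· + 1)).keys = d.keys := by
        rw [PySem.Dict.keys_modify]
        exact PySem.Dict.keys_insert_of_contains d _ hk
      obtain ⟨ihk, ihg⟩ := ih _ hc'
      refine ⟨by rw [ihk, hkeys], ?_⟩
      intro j
      rw [ihg j]
      by_cases hj : j = key
      · subst hj
        rw [if_pos rfl, if_pos rfl, PySem.Dict.getD_modify_self]
        simp [hl2]
        omega
      · rw [if_neg hj, if_neg hj, PySem.Dict.getD_modify, if_neg hj]
    · rw [if_neg hl]
      have hl2 : PySem.Chars.isIn key.toList line.toList = false := by simpa using hl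
      obtain ⟨ihk, ihg⟩ := ih d hk
      refine ⟨ihk, ?_⟩
      intro j
      rw [ihg j]
      simp [hl2]

-- the outer 'for key in flavor_counter_dict' loop
theorem pv_outer_loop (ol : List String) (ks : List String) (d : PySem.Dict String Int)
    (hnd : ks.Nodup) (hsub : ∀ k ∈ ks, d.contains k = true) :
    ((ks.foldl (fun d key =>
        ol.foldl (fun d line => if PySem.Str.isIn key line then d.modify key 0 (· + 1) else d) d) d).keys
      = d.keys)
    ∧ (∀ j, (ks.foldl (fun d key =>
        ol.foldl (fun d line => if PySem.Str.isIn key line then d.modify key 0 (· + 1) else d) d) d).getD j 0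
      = d.getD j 0 + if j ∈ ks then (ol.countP (fun line => PySem.Str.isIn j line) : Int) else 0) := by
  induction ks generalizing d with
  | nil => simp
  | cons k ks ih =>
    simp only [List.foldl_cons]
    obtain ⟨hik, hig⟩ := pv_inner_loop k ol d (hsub k (by simp))
    have hsub' : ∀ k' ∈ ks,
        (ol.foldl (fun d line => if PySem.Str.isIn k line then d.modify k 0 (· + 1) else d) d).contains k' = true := by
      intro k' hk'
      have h0 := hsub k' (by simp [hk'])
      rw [PySem.Dict.contains_eq_decide_mem_keys] at h0 ⊢
      rw [hik]; exact h0
    obtain ⟨ihk, ihg⟩ := ih _ hnd.of_cons hsub'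
    refine ⟨by rw [ihk, hik], ?_⟩
    intro j
    rw [ihg j, hig j]
    by_cases hj : j = k
    · subst hj
      have hjks : j ∉ ks := (List.nodup_cons.mp hnd).1
      rw [if_pos rfl, if_neg hjks, if_pos (by simp : j ∈ j :: ks)]
      ring
    · rw [if_neg hj]
      by_cases hjm : j ∈ ks
      · rw [if_pos hjm, if_pos (List.mem_cons_of_mem k hjm)]
      · rw [if_neg hjm, if_neg (by simp [hj, hjm])]

-- A computes the characterization
theorem pv_A_eq (possible_flavor output_list : List String) :
    get_count_for_flavor possible_flavor output_list = pvChar possible_flavor output_list := by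
  simp only [get_count_for_flavor]
  set wrap : String → String := fun f => "-" ++ f ++ "-" with hwrap
  have h1 : (possible_flavor.foldl (fun d k => d.insert k (0:Int)) PySem.Dict.empty).items
      = (PySem.List.dedup possible_flavor).map (fun k => (k, (0 : Int))) := by
    rw [pv_foldl_insert_zero possible_flavor PySem.Dict.empty rfl]
    rw [PySem.List.dedup_eq_ofList, PySem.Set.ofList_eq_foldl]
    rfl
  have hnodupkeys : ((PySem.List.dedup possible_flavor).map wrap).Nodup := by
    rw [PySem.List.dedup_eq_ofList]
    exact (PySem.Set.nodup_ofList possible_flavor).map pv_wrap_inj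
  have h2 : ((possible_flavor.foldl (fun d k => d.insert k (0:Int)) PySem.Dict.empty).items.foldl
        (fun d kv => d.insert (wrap kv.1) kv.2) PySem.Dict.empty).items
      = (PySem.List.dedup possible_flavor).map (fun f => (wrap f, (0 : Int))) := by
    rw [h1]
    have hfresh : ∀ a ∈ (PySem.List.dedup possible_flavor).map (fun k => (k, (0:Int))),
        (PySem.Dict.empty : PySem.Dict String Int).contains ((fun kv : String × Int => wrap kv.1) a) = false := by
      intro a _; simp
    have hnod : (((PySem.List.dedup possible_flavor).map (fun k => (k, (0:Int)))).map
        (fun kv : String × Int => wrap kv.1)).Nodup := by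
      rw [List.map_map]
      simpa [Function.comp] using hnodupkeys
    have h3 := PySem.Dict.items_foldl_insert_fresh
      ((PySem.List.dedup possible_flavor).map (fun k => (k, (0:Int))))
      (fun kv : String × Int => wrap kv.1) (fun kv : String × Int => kv.2)
      PySem.Dict.empty hfresh hnod
    simpa [List.map_map, Function.comp] using h3
  set d2 := (possible_flavor.foldl (fun d k => d.insert k (0:Int)) PySem.Dict.empty).items.foldl
        (fun d kv => d.insert (wrap kv.1) kv.2) PySem.Dict.empty with hd2
  have hkeys2 : d2.keys = (PySem.List.dedup possible_flavor).map wrap := by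
    simp only [PySem.Dict.keys]
    rw [h2, List.map_map]
    rfl
  have hnd2 : d2.keys.Nodup := by rw [hkeys2]; exact hnodupkeys
  have hcont : ∀ k ∈ d2.keys, d2.contains k = true := by
    intro k hk
    rw [PySem.Dict.contains_eq_decide_mem_keys]
    simpa using hk
  obtain ⟨hfk, hfg⟩ := pv_outer_loop output_list d2.keys d2 hnd2 hcont
  set final := d2.keys.foldl (fun d key =>
      output_list.foldl (fun d line => if PySem.Str.isIn key line then d.modify key 0 (· + 1) else d) d) d2 with hfinal
  have hfnd : final.keys.Nodup := by rw [hfk]; exact hnd2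
  rw [PySem.Dict.items_eq_map_keys final hfnd 0, hfk, hkeys2]
  unfold pvChar
  rw [← hwrap, List.map_map, List.map_map]
  apply List.map_congr_left
  intro f hf
  have hmem : wrap f ∈ d2.keys := by rw [hkeys2]; exact List.mem_map_of_mem hf
  have hg0 : d2.getD (wrap f) 0 = 0 := by
    have hmi : (wrap f, (0:Int)) ∈ d2.items := by
      rw [h2]; exact List.mem_map_of_mem hf
    exact PySem.Dict.getD_of_mem_items _ hmi hnd2 0
  have hfin := hfg (wrap f)
  rw [hg0, if_pos hmem, zero_add] at hfin
  simp [Function.comp, hfin]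

-- ===== B-side lemmas =====

-- membership in the dash-position list
theorem pv_mem_dashes (l : List Char) (x : Int) :
    x ∈ pvDashes l ↔ ∃ i : Nat, x = (i : Int) ∧ l[i]? = some '-' := by
  unfold pvDashes
  rw [List.mem_filterMap]
  constructor
  · rintro ⟨p, hp, hf⟩
    obtain ⟨k, hk, rfl⟩ := (PySem.List.mem_enumerate_iff _ _ _).mp hp
    by_cases hc : l[k] = '-'
    · refine ⟨k, ?_, ?_⟩
      · simp only [hc, if_pos] at hf
        simpa using hf.symm
      · simp [List.getElem?_eq_getElem hk, hc]
    · simp [hc] at hf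
  · rintro ⟨i, rfl, hi⟩
    obtain ⟨hlt, hv⟩ := List.getElem?_eq_some_iff.mp hi
    exact ⟨((0 : Int) + i, l[i]), (PySem.List.mem_enumerate_iff _ _ _).mpr ⟨i, hlt, rfl⟩,
      by simp [hv]⟩

-- membership in the between-dash token set
theorem pv_mem_toks (line : String) (f : String) :
    f ∈ pvToks line ↔ ∃ i j : Nat, i < j ∧ line.toList[i]? = some '-' ∧ line.toList[j]? = some '-'
      ∧ f.toList = (line.toList.drop (i + 1)).take (j - (i + 1)) := by
  unfold pvToks
  rw [PySem.Set.mem_ofList, List.mem_flatMap]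
  constructor
  · rintro ⟨a, ha, hf⟩
    rw [List.mem_map] at hf
    obtain ⟨b, hb, rfl⟩ := hf
    obtain ⟨hb', hab⟩ := List.mem_filter.mp hb
    obtain ⟨i, rfl, hi⟩ := (pv_mem_dashes _ _).mp ha
    obtain ⟨j, rfl, hj⟩ := (pv_mem_dashes _ _).mp hb'
    have hij : i < j := by exact_mod_cast of_decide_eq_true hab
    refine ⟨i, j, hij, hi, hj, ?_⟩
    have : ((i : Int) + 1) = ((i + 1 : Nat) : Int) := by omega
    rw [PySem.Str.toList_slice, PySem.Chars.slice_eq_listSlice, this, PySem.List.slice_natCast]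
  · rintro ⟨i, j, hij, hi, hj, hf⟩
    refine ⟨(i : Int), (pv_mem_dashes _ _).mpr ⟨i, rfl, hi⟩, ?_⟩
    rw [List.mem_map]
    refine ⟨(j : Int), List.mem_filter.mpr ⟨(pv_mem_dashes _ _).mpr ⟨j, rfl, hj⟩,
      by exact_mod_cast decide_eq_true (by exact_mod_cast hij)⟩, ?_⟩
    apply String.toList_inj.mp
    have : ((i : Int) + 1) = ((i + 1 : Nat) : Int) := by omega
    rw [PySem.Str.toList_slice, PySem.Chars.slice_eq_listSlice, this, PySem.List.slice_natCast, hf]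

-- '-f-' occurs in l iff f lies between two dash positions of l
theorem pv_isIn_iff (l fl : List Char) :
    PySem.Chars.isIn ('-' :: (fl ++ ['-'])) l = true
      ↔ ∃ i j : Nat, i < j ∧ l[i]? = some '-' ∧ l[j]? = some '-'
          ∧ fl = (l.drop (i + 1)).take (j - (i + 1)) := by
  rw [← PySem.Chars.exists_prefix_drop_iff_isIn]
  constructor
  · rintro ⟨d, t, ht⟩
    refine ⟨d, d + 1 + fl.length, by omega, ?_, ?_, ?_⟩
    · have h0 : (l.drop d)[0]? = some '-' := by rw [← ht]; simp
      rw [List.getElem?_drop] at h0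
      simpa using h0
    · have h1 : (l.drop d)[1 + fl.length]? = some '-' := by
        rw [← ht]
        have : ((('-' :: (fl ++ ['-'])) ++ t))[1 + fl.length]?
            = ((fl ++ ['-']) ++ t)[fl.length]? := by
          rw [Nat.add_comm 1 fl.length]
          simp [List.append_assoc]
        rw [this, List.append_assoc, List.getElem?_append_right (le_refl _)]
        simp
      rw [List.getElem?_drop] at h1
      have : d + (1 + fl.length) = d + 1 + fl.length := by omega
      rwa [this] at h1
    · have hdrop : l.drop (d + 1) = fl ++ ('-' :: t) := by
        rw [← List.tail_drop, ← ht]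
        simp [List.append_assoc]
      have : d + 1 + fl.length - (d + 1) = fl.length := by omega
      rw [this, hdrop, List.take_left]
  · rintro ⟨i, j, hij, hi, hj, hf⟩
    obtain ⟨hilt, hiv⟩ := List.getElem?_eq_some_iff.mp hi
    obtain ⟨hjlt, hjv⟩ := List.getElem?_eq_some_iff.mp hj
    refine ⟨i, l.drop (j + 1), ?_⟩
    have hdi : l.drop i = '-' :: l.drop (i + 1) := by
      rw [List.drop_eq_getElem_cons hilt, hiv]
    have hdj : l.drop j = '-' :: l.drop (j + 1) := by
      rw [List.drop_eq_getElem_cons hjlt, hjv]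
    have hsplit : l.drop (i + 1) = fl ++ l.drop j := by
      conv_lhs => rw [← List.take_append_drop (j - (i + 1)) (l.drop (i + 1))]
      rw [← hf, List.drop_drop]
      congr 2
      omega
    rw [hdi, hsplit, hdj]
    simp [List.append_assoc]

theorem pv_wrap_toList (f : String) : ("-" ++ f ++ "-").toList = '-' :: (f.toList ++ ['-']) := by
  simp [String.toList_append]

-- per-line: f is a between-dash token iff the wrapped key occurs in the line
theorem pv_str_isIn_wrap (line f : String) :
    PySem.Str.isIn ("-" ++ f ++ "-") line
      = PySem.Chars.isIn ('-' :: (f.toList ++ ['-'])) line.toList := by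
  rw [← pv_wrap_toList]
  simp

theorem pv_mem_toks_isIn (line f : String) :
    f ∈ pvToks line ↔ PySem.Str.isIn ("-" ++ f ++ "-") line = true := by
  rw [pv_mem_toks, pv_str_isIn_wrap, pv_isIn_iff]

-- the per-line tally loop over a duplicate-free token list
theorem pv_tok_loop (toks : List String) (hnd : toks.Nodup) (d : PySem.Dict String Int) :
    ((toks.foldl (fun d tok => if d.contains tok then d.modify tok 0 (· + 1) else d) d).keys = d.keys)
    ∧ (∀ j, (toks.foldl (fun d tok => if d.contains tok then d.modify tok 0 (· + 1) else d) d).getD j 0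
        = d.getD j 0 + if j ∈ toks ∧ j ∈ d.keys then 1 else 0) := by
  induction toks generalizing d with
  | nil => simp
  | cons t toks ih =>
    simp only [List.foldl_cons]
    by_cases hc : d.contains t = true
    · rw [if_pos hc]
      have hkeys : (d.modify t 0 (· + 1)).keys = d.keys := by
        rw [PySem.Dict.keys_modify]
        exact PySem.Dict.keys_insert_of_contains d _ hc
      obtain ⟨ihk, ihg⟩ := ih hnd.of_cons (d.modify t 0 (· + 1))
      refine ⟨by rw [ihk, hkeys], ?_⟩
      intro j
      rw [ihg j, hkeys, PySem.Dict.getD_modify]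
      have htk : t ∈ d.keys := by
        rw [PySem.Dict.contains_eq_decide_mem_keys] at hc
        exact of_decide_eq_true hc
      by_cases hj : j = t
      · subst hj
        have hjt : j ∉ toks := (List.nodup_cons.mp hnd).1
        rw [if_pos rfl, if_neg (by simp [hjt]), if_pos ⟨by simp, htk⟩]
        ring
      · rw [if_neg hj]
        by_cases hjm : j ∈ toks ∧ j ∈ d.keys
        · rw [if_pos hjm, if_pos ⟨List.mem_cons_of_mem t hjm.1, hjm.2⟩]
        · rw [if_neg hjm, if_neg (by
            rintro ⟨hm, hk⟩
            rcases List.mem_cons.mp hm with h | h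
            · exact hj h
            · exact hjm ⟨h, hk⟩)]
    · rw [if_neg hc]
      have htk : t ∉ d.keys := by
        rw [PySem.Dict.contains_eq_decide_mem_keys] at hc
        simpa using hc
      obtain ⟨ihk, ihg⟩ := ih hnd.of_cons d
      refine ⟨ihk, ?_⟩
      intro j
      rw [ihg j]
      by_cases hjm : j ∈ toks ∧ j ∈ d.keys
      · rw [if_pos hjm, if_pos ⟨List.mem_cons_of_mem t hjm.1, hjm.2⟩]
      · rw [if_neg hjm, if_neg (by
          rintro ⟨hm, hk⟩
          rcases List.mem_cons.mp hm with h | h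
          · subst h; exact htk hk
          · exact hjm ⟨h, hk⟩)]

-- the loop over the output lines
theorem pv_line_loop (lines : List String) (d : PySem.Dict String Int) :
    ((lines.foldl (fun counts line =>
        (pvToks line).foldl (fun d tok => if d.contains tok then d.modify tok 0 (· + 1) else d) counts) d).keys
      = d.keys)
    ∧ (∀ j, (lines.foldl (fun counts line =>
        (pvToks line).foldl (fun d tok => if d.contains tok then d.modify tok 0 (· + 1) else d) counts) d).getD j 0
      = d.getD j 0 + if j ∈ d.keys then (lines.countP (fun line => decide (j ∈ pvToks line)) : Int) else 0) := by
  induction lines generalizing d with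
  | nil => simp
  | cons line lines ih =>
    simp only [List.foldl_cons]
    have hnd : (pvToks line).Nodup := PySem.Set.nodup_ofList _
    obtain ⟨htk, htg⟩ := pv_tok_loop (pvToks line) hnd d
    obtain ⟨ihk, ihg⟩ := ih ((pvToks line).foldl (fun d tok => if d.contains tok then d.modify tok 0 (· + 1) else d) d)
    refine ⟨by rw [ihk, htk], ?_⟩
    intro j
    rw [ihg j, htk, htg j, List.countP_cons]
    by_cases hk : j ∈ d.keys
    · rw [if_pos hk, if_pos hk]
      by_cases hm : j ∈ pvToks line
      · rw [if_pos ⟨hm, hk⟩]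
        simp [hm]
        ring
      · rw [if_neg (by rintro ⟨h, _⟩; exact hm h)]
        simp [hm]
    · rw [if_neg hk, if_neg hk, if_neg (by rintro ⟨_, h⟩; exact hk h)]
      ring

-- B computes the characterization
theorem pv_B_eq (possible_flavor output_list : List String) :
    get_count_for_flavor_alt possible_flavor output_list = pvChar possible_flavor output_list := by
  simp only [get_count_for_flavor_alt]
  have h1 : (possible_flavor.foldl (fun d k => d.insert k (0:Int)) PySem.Dict.empty).items
      = (PySem.List.dedup possible_flavor).map (fun k => (k, (0 : Int))) := by
    rw [pv_foldl_insert_zero possible_flavor PySem.Dict.empty rfl]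
    rw [PySem.List.dedup_eq_ofList, PySem.Set.ofList_eq_foldl]
    rfl
  set d0 := possible_flavor.foldl (fun d k => d.insert k (0:Int)) PySem.Dict.empty with hd0
  have hkeys0 : d0.keys = PySem.List.dedup possible_flavor := by
    simp only [PySem.Dict.keys]
    rw [h1, List.map_map]
    have hid : ∀ a ∈ PySem.List.dedup possible_flavor,
        ((fun x : String × Int => x.1) ∘ fun k => (k, (0 : Int))) a = id a := fun a _ => rfl
    rw [List.map_congr_left hid, List.map_id]
  have hnd0 : d0.keys.Nodup := by rw [hkeys0]; exact PySem.List.nodup_dedup _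
  obtain ⟨hfk, hfg⟩ := pv_line_loop output_list d0
  set final := output_list.foldl (fun counts line =>
      (pvToks line).foldl (fun d tok => if d.contains tok then d.modify tok 0 (· + 1) else d) counts) d0 with hfinal
  have hfnd : final.keys.Nodup := by rw [hfk]; exact hnd0
  rw [PySem.Dict.items_eq_map_keys final hfnd 0, hfk, hkeys0]
  unfold pvChar
  rw [List.map_map, List.map_map]
  apply List.map_congr_left
  intro f hf
  have hmem : f ∈ d0.keys := by rw [hkeys0]; exact hf
  have hg0 : d0.getD f 0 = 0 := by
    have hmi : (f, (0:Int)) ∈ d0.items := by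
      rw [h1]; exact List.mem_map_of_mem hf
    exact PySem.Dict.getD_of_mem_items _ hmi hnd0 0
  have hfin := hfg f
  rw [hg0, if_pos hmem, zero_add] at hfin
  have hcount : output_list.countP (fun line => decide (f ∈ pvToks line))
      = output_list.countP (fun line => PySem.Str.isIn ("-" ++ f ++ "-") line) := by
    apply List.countP_congr
    intro line _
    by_cases hm : f ∈ pvToks line
    · rw [decide_eq_true hm, (pv_mem_toks_isIn line f).mp hm]
    · rw [decide_eq_false hm]
      exact iff_of_false (by simp) (fun hh => hm ((pv_mem_toks_isIn line f).mpr hh))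
  simp [Function.comp, hfin, hcount]

-- ===== VERDICT (by name: the statement is the Claim_ definition above) =====
theorem get_count_for_flavor_spec : Claim_equal_get_count_for_flavor := by
  intro possible_flavor output_list _
  unfold Spec_get_count_for_flavor
  rw [pv_A_eq, pv_B_eq]
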